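-- pv_equiv track=rewrite | github.com/Skyffox/Advent-of-Code | 2024/day08.py | find_antennas
-- ===== SOURCE A (Python) =====
-- from typing import List, Dict
--
-- def find_antennas(grid: List[List[str]]) -> Dict[str, List[List[int]]]:
--     """
--     This function scans through the grid to find all instances of antennas (non-empty cells).
--     It creates a dictionary that groups the same types of antennas together, mapping each antenna
--     type to a list of coordinates where that antenna appears.
--
--     Args:
--         grid (List[List[str]]): A 2D list representing the grid, where each element is a character.
--
--     Returns:
--         Dict[str, List[List[int]]]: A dictionary where keys are antenna types (characters) and values are lists of
--                                      coordinates (tuples) where the antennas are located.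
--     """
--     antennas: Dict[str, List[List[int]]] = {}
--     for y, row in enumerate(grid):
--         for x, item in enumerate(row):
--             if item != ".":
--                 if item not in antennas:
--                     antennas[item] = [[y, x]]
--                 else:
--                     antennas[item].append([y, x])
--     return antennas
-- ===== SOURCE B (Python) =====
-- from typing import List, Dict
--
--
-- def find_antennas(grid: List[List[str]]) -> Dict[str, List[List[int]]]:
--     # Flatten the grid into (item, y, x) triples, list the distinct antenna
--     # types in first-appearance order, then build each group by filtering
--     # the flat list per type.
--     cells = [(item, y, x)
--              for y, row in enumerate(grid)
--              for x, item in enumerate(row)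
--              if item != "."]
--     keys = list(dict.fromkeys(item for item, _, _ in cells))
--     return {k: [[y, x] for item, y, x in cells if item == k] for k in keys}
-- ===== Notes on version B (the rewrite author's own statement) =====
-- stated objective: alternative
-- what changed: Replaces the single-pass dict grouping (membership test + insert/append per cell) by flatten-to-triples, ordered key dedup, and a per-key filter pass that builds each group at once.
import Mathlib
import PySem

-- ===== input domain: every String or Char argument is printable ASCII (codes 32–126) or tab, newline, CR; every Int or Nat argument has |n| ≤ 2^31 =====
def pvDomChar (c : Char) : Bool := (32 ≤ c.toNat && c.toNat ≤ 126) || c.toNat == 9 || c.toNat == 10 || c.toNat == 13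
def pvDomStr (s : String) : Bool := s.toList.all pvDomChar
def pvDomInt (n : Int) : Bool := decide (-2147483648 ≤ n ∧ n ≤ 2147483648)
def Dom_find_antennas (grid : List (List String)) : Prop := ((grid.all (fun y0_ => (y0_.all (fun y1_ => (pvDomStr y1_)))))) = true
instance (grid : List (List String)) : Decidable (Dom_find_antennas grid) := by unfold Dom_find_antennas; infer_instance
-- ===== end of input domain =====

-- B replaces A's single-pass dict grouping by flatten / ordered key dedup / per-key filter (alternative decomposition, same results).

-- ===== PORT A =====
-- A: one pass over the grid, growing a dict: new antenna type → fresh entry, known type → append coordinate.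
def find_antennas (grid : List (List String)) : List (String × List (List Int)) :=
  ((PySem.List.enumerate grid).foldl (fun d p =>
    (PySem.List.enumerate p.2).foldl (fun d q =>
      if q.2 ≠ "." then
        if d.contains q.2 = false then d.insert q.2 [[p.1, q.1]]
        else d.modify q.2 [] (· ++ [[p.1, q.1]])
      else d) d)
    (PySem.Dict.empty : PySem.Dict String (List (List Int)))).items

-- ===== PORT B =====
-- B: flat list of (item, y, x) triples, distinct keys in first-appearance order, one filter pass per key.
def find_antennas_alt (grid : List (List String)) : List (String × List (List Int)) :=
  let cells : List (String × Int × Int) :=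
    (PySem.List.enumerate grid).flatMap (fun p =>
      (PySem.List.enumerate p.2).filterMap (fun q =>
        if q.2 ≠ "." then some (q.2, p.1, q.1) else none))
  (PySem.List.dedup (cells.map (·.1))).map (fun k =>
    (k, cells.filterMap (fun c => if c.1 = k then some [c.2.1, c.2.2] else none)))

-- ===== PRECONDITION & SPEC =====
def Spec_find_antennas (grid : List (List String)) (out : List (String × List (List Int))) : Prop := out = find_antennas_alt grid
instance (grid : List (List String)) (out : List (String × List (List Int))) : Decidable (Spec_find_antennas grid out) := by unfold Spec_find_antennas; infer_instance

-- ===== CLAIM (what is proved, stated in full; the proofs are below) =====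
def Claim_equal_find_antennas : Prop := ∀ (grid : List (List String)), Dom_find_antennas grid → Spec_find_antennas grid (find_antennas grid)

-- ===== LEMMAS AND PROOFS =====

-- A's loop body, over one flat cell (item, y, x).
def pvStep (d : PySem.Dict String (List (List Int))) (c : String × Int × Int) :
    PySem.Dict String (List (List Int)) :=
  if d.contains c.1 = false then d.insert c.1 [[c.2.1, c.2.2]]
  else d.modify c.1 [] (· ++ [[c.2.1, c.2.2]])

-- B's grouping, as a function of the flat cell list.
def pvGroup (cells : List (String × Int × Int)) : List (String × List (List Int)) :=
  (PySem.List.dedup (cells.map (·.1))).map (fun k =>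
    (k, cells.filterMap (fun c => if c.1 = k then some [c.2.1, c.2.2] else none)))

lemma pvDedup_append_singleton {α : Type} [BEq α] [LawfulBEq α] (l : List α) (a : α) :
    PySem.List.dedup (l ++ [a]) =
      if a ∈ PySem.List.dedup l then PySem.List.dedup l else PySem.List.dedup l ++ [a] := by
  simp [PySem.List.dedup, PySem.Set.ofList, List.foldl_append, PySem.Set.add]

def pvCells (grid : List (List String)) : List (String × Int × Int) :=
  (PySem.List.enumerate grid).flatMap (fun p =>
    (PySem.List.enumerate p.2).filterMap (fun q =>
      if q.2 ≠ "." then some (q.2, p.1, q.1) else none))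

lemma pvAlt_eq (grid : List (List String)) :
    find_antennas_alt grid = pvGroup (pvCells grid) := rfl

lemma pvKeys_pvGroup (cells : List (String × Int × Int)) :
    (pvGroup cells).map (·.1) = PySem.List.dedup (cells.map (·.1)) := by
  unfold pvGroup
  rw [List.map_map]
  exact List.map_id'' (fun _ => rfl) _

lemma pvFold_eq_pvGroup (cells : List (String × Int × Int)) :
    (cells.foldl pvStep PySem.Dict.empty).items = pvGroup cells := by
  induction cells using List.reverseRecOn with
  | nil => rfl
  | append_singleton cells c ih =>
    rw [List.foldl_append]
    simp only [List.foldl_cons, List.foldl_nil]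
    set d := cells.foldl pvStep PySem.Dict.empty
    clear_value d
    have hkeys : d.keys = PySem.List.dedup (cells.map (·.1)) := by
      show d.items.map (·.1) = _
      rw [ih, pvKeys_pvGroup]
    have hnodup : d.keys.Nodup := by rw [hkeys]; exact PySem.List.nodup_dedup _
    have hcontains : d.contains c.1 = decide (c.1 ∈ cells.map (·.1)) := by
      rw [PySem.Dict.contains_eq_decide_mem_keys, hkeys]
      simp
    by_cases hmem : c.1 ∈ cells.map (·.1)
    · -- existing key: A updates the entry in place
      have hc : d.contains c.1 = true := by simp [hcontains, hmem]
      have hentry : (c.1, cells.filterMap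
          (fun c' => if c'.1 = c.1 then some [c'.2.1, c'.2.2] else none)) ∈ d.items := by
        rw [ih]
        exact List.mem_map.mpr ⟨c.1, by simpa [PySem.List.mem_dedup] using hmem, rfl⟩
      have hgetD : d.getD c.1 [] = cells.filterMap
          (fun c' => if c'.1 = c.1 then some [c'.2.1, c'.2.2] else none) :=
        PySem.Dict.getD_of_mem_items d hentry hnodup []
      have hitems : (pvStep d c).items =
          d.items.map (fun p => if p.1 == c.1
            then (c.1, d.getD c.1 [] ++ [[c.2.1, c.2.2]]) else p) := by
        simp only [pvStep, PySem.Dict.modify, PySem.Dict.insert, hc]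
        simp
      rw [hitems, ih, hgetD]
      unfold pvGroup
      rw [show (cells ++ [c]).map (·.1) = cells.map (·.1) ++ [c.1] by simp]
      rw [pvDedup_append_singleton]
      simp only [PySem.List.mem_dedup, hmem, if_true]
      rw [List.map_map]
      apply List.map_congr_left
      intro k hk
      by_cases hkc : k = c.1
      · subst hkc
        simp [Function.comp, List.filterMap_append]
      · simp [Function.comp, List.filterMap_append, hkc, Ne.symm hkc]
    · -- new key: A appends a fresh entry at the end
      have hc : d.contains c.1 = false := by simp [hcontains, hmem]
      have hitems : (pvStep d c).items = d.items ++ [(c.1, [[c.2.1, c.2.2]])] := by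
        simp only [pvStep, PySem.Dict.insert, hc]
        simp
      rw [hitems, ih]
      unfold pvGroup
      rw [show (cells ++ [c]).map (·.1) = cells.map (·.1) ++ [c.1] by simp]
      rw [pvDedup_append_singleton]
      simp only [PySem.List.mem_dedup, hmem, if_false]
      rw [List.map_append]
      congr 1
      · apply List.map_congr_left
        intro k hk
        have hkmem : k ∈ cells.map (·.1) := (PySem.List.mem_dedup _ _).mp hk
        have hkc : ¬ c.1 = k := fun h => hmem (h ▸ hkmem)
        simp [List.filterMap_append, hkc]
      · have hnil : cells.filterMap
            (fun c' => if c'.1 = c.1 then some [c'.2.1, c'.2.2] else none) = [] := by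
          apply List.filterMap_eq_nil_iff.mpr
          intro c' hc'
          have : c'.1 ≠ c.1 := fun h => hmem (h ▸ List.mem_map_of_mem hc')
          simp [this]
        simp [List.filterMap_append, hnil]

-- ===== VERDICT (by name: the statement is the Claim_ definition above) =====
theorem find_antennas_spec : Claim_equal_find_antennas := by
  intro grid _
  show find_antennas grid = find_antennas_alt grid
  rw [pvAlt_eq, ← pvFold_eq_pvGroup]
  unfold find_antennas pvCells
  congr 1
  rw [List.foldl_flatMap]
  congr 1
  funext d p
  rw [List.foldl_filterMap]
  congr 1
  funext d' q
  by_cases h : q.2 ≠ "." <;> simp [pvStep, h]
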